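-- pv_equiv track=rewrite | github.com/AdeyAmare/customer-experience-analytics | src/sentiment_thematic_analysis.py | assign_theme
-- ===== SOURCE A (Python) =====
-- THEME_KEYWORDS = {
--     "Mobile App & Digital": [
--         "app", "login", "update", "interface", "screen", "feature",
--         "digital", "mobile", "phone", "crash", "biometric", "ui", "ux"
--     ],
--     "Customer Service": [
--         "service", "staff", "manager", "support", "wait", "queue", "call",
--         "agent", "teller", "rude", "polite", "help", "cs"
--     ],
--     "Transactions & Fees": [
--         "money", "transfer", "transaction", "fee", "charge", "balance",
--         "deposit", "withdrawal", "payment", "rate", "limit"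
--     ],
--     "Security & Fraud": [
--         "fraud", "scam", "security", "alert", "hack", "safe",
--         "verification", "otp", "locked", "blocked", "account"
--     ],
--     "Cards & Accounts": [
--         "card", "debit", "credit", "account", "opening", "closure",
--         "limit", "atm", "branch"
--     ]
-- }
--
-- def assign_theme(keywords):
--     """Map a list of keywords to one or more themes using THEME_KEYWORDS.
--
--     The mapping is a simple membership test: each keyword and its tokenized
--     parts are checked against the theme keyword lists.
--
--     Args:
--         keywords (list[str]): Extracted keywords for a single document.
--
--     Returns:
--         str: Comma-separated list of matched themes or 'General / Unspecified'.
--     """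
--     terms = set()
--     for kw in keywords:
--         if not kw:
--             continue
--         # add the exact keyword (could be bigram) and its parts
--         terms.add(kw)
--         terms.update(kw.split())
--
--     found = [
--         theme for theme, kws in THEME_KEYWORDS.items()
--         if any(t in kws for t in terms)
--     ]
--     if found:
--         # return sorted unique list for determinism
--         return ", ".join(sorted(set(found)))
--     else:
--         return "General / Unspecified"
-- ===== SOURCE B (Python) =====
-- THEME_KEYWORDS = {
--     "Mobile App & Digital": [
--         "app", "login", "update", "interface", "screen", "feature",
--         "digital", "mobile", "phone", "crash", "biometric", "ui", "ux"
--     ],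
--     "Customer Service": [
--         "service", "staff", "manager", "support", "wait", "queue", "call",
--         "agent", "teller", "rude", "polite", "help", "cs"
--     ],
--     "Transactions & Fees": [
--         "money", "transfer", "transaction", "fee", "charge", "balance",
--         "deposit", "withdrawal", "payment", "rate", "limit"
--     ],
--     "Security & Fraud": [
--         "fraud", "scam", "security", "alert", "hack", "safe",
--         "verification", "otp", "locked", "blocked", "account"
--     ],
--     "Cards & Accounts": [
--         "card", "debit", "credit", "account", "opening", "closure",
--         "limit", "atm", "branch"
--     ]
-- }
--
-- # Inverted index built once at module load: keyword -> list of all themes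
-- # whose keyword list contains it (shared keywords like 'account'/'limit'
-- # map to several themes).
-- KEYWORD_TO_THEMES = {}
-- for _theme, _kws in THEME_KEYWORDS.items():
--     for _kw in _kws:
--         KEYWORD_TO_THEMES.setdefault(_kw, []).append(_theme)
--
--
-- def assign_theme(keywords):
--     """Map a list of keywords to one or more themes via an inverted index."""
--     terms = set()
--     for kw in keywords:
--         if not kw:
--             continue
--         terms.add(kw)
--         terms.update(kw.split())
--     found = set()
--     for t in terms:
--         found.update(KEYWORD_TO_THEMES.get(t, ()))
--     if found:
--         return ", ".join(sorted(found))
--     return "General / Unspecified"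
-- ===== Notes on version B (the rewrite author's own statement) =====
-- stated objective: idiomatic
-- what changed: Replaces the per-call scan over all five theme keyword lists with a module-load inverted index keyword->themes; assign_theme now loops over the extracted terms and unions direct index lookups, instead of testing every theme's list against every term.
import Mathlib
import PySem

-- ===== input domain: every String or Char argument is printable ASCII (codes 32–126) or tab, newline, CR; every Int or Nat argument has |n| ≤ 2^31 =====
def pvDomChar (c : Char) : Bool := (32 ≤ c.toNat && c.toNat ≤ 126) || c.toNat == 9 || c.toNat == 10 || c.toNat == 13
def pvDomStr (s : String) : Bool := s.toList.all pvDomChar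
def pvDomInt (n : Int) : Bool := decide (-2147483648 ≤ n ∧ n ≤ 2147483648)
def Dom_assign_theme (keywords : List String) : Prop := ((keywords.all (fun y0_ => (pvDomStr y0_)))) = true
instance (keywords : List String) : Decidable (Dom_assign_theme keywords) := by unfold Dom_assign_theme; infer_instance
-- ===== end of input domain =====

set_option maxRecDepth 100000


-- B replaces A's per-call scan over every theme's keyword list by a single inverted
-- index keyword → themes built once; assign_theme_alt loops over the terms and unions
-- direct index lookups (idiomatic restructuring, same exact output).

-- ===== PORT A =====
def THEME_KEYWORDS : PySem.Dict String (List String) :=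
  PySem.Dict.ofList [
    ("Mobile App & Digital",
      ["app", "login", "update", "interface", "screen", "feature",
       "digital", "mobile", "phone", "crash", "biometric", "ui", "ux"]),
    ("Customer Service",
      ["service", "staff", "manager", "support", "wait", "queue", "call",
       "agent", "teller", "rude", "polite", "help", "cs"]),
    ("Transactions & Fees",
      ["money", "transfer", "transaction", "fee", "charge", "balance",
       "deposit", "withdrawal", "payment", "rate", "limit"]),
    ("Security & Fraud",
      ["fraud", "scam", "security", "alert", "hack", "safe",
       "verification", "otp", "locked", "blocked", "account"]),
    ("Cards & Accounts",
      ["card", "debit", "credit", "account", "opening", "closure",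
       "limit", "atm", "branch"])]

def assign_theme (keywords : List String) : String :=
  let terms : PySem.Set String := keywords.foldl (fun terms kw =>
    if kw = "" then terms
    else PySem.Set.update (PySem.Set.add terms kw) (PySem.Str.split₀ kw)) PySem.Set.empty
  let found : List String := THEME_KEYWORDS.items.foldl (fun found p =>
    if terms.any (fun t => p.2.contains t) then found ++ [p.1] else found) []
  if found ≠ [] then
    PySem.Str.join ", " (PySem.List.sorted (PySem.Set.ofList found) (fun x => x) false)
  else "General / Unspecified"

-- ===== PORT B =====
-- module-load loop: for theme, kws in THEME_KEYWORDS.items(): for kw in kws: setdefault(kw, []).append(theme)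
def KEYWORD_TO_THEMES : PySem.Dict String (List String) :=
  THEME_KEYWORDS.items.foldl (fun d p =>
    p.2.foldl (fun d kw => d.modify kw [] (fun v => v ++ [p.1])) d) PySem.Dict.empty

def assign_theme_alt (keywords : List String) : String :=
  let terms : PySem.Set String := keywords.foldl (fun terms kw =>
    if kw = "" then terms
    else PySem.Set.update (PySem.Set.add terms kw) (PySem.Str.split₀ kw)) PySem.Set.empty
  let found : PySem.Set String := terms.foldl (fun found t =>
    PySem.Set.update found (KEYWORD_TO_THEMES.getD t [])) PySem.Set.empty
  if found ≠ [] then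
    PySem.Str.join ", " (PySem.List.sorted found (fun x => x) false)
  else "General / Unspecified"

-- ===== PRECONDITION & SPEC =====
def Spec_assign_theme (keywords : List String) (out : String) : Prop := out = assign_theme_alt keywords
instance (keywords : List String) (out : String) : Decidable (Spec_assign_theme keywords out) := by unfold Spec_assign_theme; infer_instance

-- ===== CLAIM (what is proved, stated in full; the proofs are below) =====
def Claim_equal_assign_theme : Prop := ∀ (keywords : List String), Dom_assign_theme keywords → Spec_assign_theme keywords (assign_theme keywords)

-- ===== LEMMAS AND PROOFS =====

-- the inner module-load loop over one theme's keyword list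
theorem mem_getD_inner (theme : String) (kws : List String)
    (d : PySem.Dict String (List String)) (t th : String) :
    th ∈ (kws.foldl (fun d kw => d.modify kw [] (fun v => v ++ [theme])) d).getD t []
      ↔ th ∈ d.getD t [] ∨ (t ∈ kws ∧ th = theme) := by
  induction kws generalizing d with
  | nil => simp
  | cons kw rest ih =>
    simp only [List.foldl_cons, ih, PySem.Dict.getD_modify, List.mem_cons]
    by_cases h : t = kw
    · simp [h]
      tauto
    · simp [h]

-- the outer module-load loop over the theme items
theorem mem_getD_outer (items : List (String × List String))
    (d : PySem.Dict String (List String)) (t th : String) :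
    th ∈ (items.foldl (fun d p =>
        p.2.foldl (fun d kw => d.modify kw [] (fun v => v ++ [p.1])) d) d).getD t []
      ↔ th ∈ d.getD t [] ∨ ∃ p ∈ items, p.1 = th ∧ t ∈ p.2 := by
  induction items generalizing d with
  | nil => simp
  | cons p rest ih =>
    simp only [List.foldl_cons, ih, mem_getD_inner, List.mem_cons]
    constructor
    · rintro (((h | ⟨h1, h2⟩)) | ⟨q, hq, h⟩)
      · exact Or.inl h
      · exact Or.inr ⟨p, Or.inl rfl, h2.symm, h1⟩
      · exact Or.inr ⟨q, Or.inr hq, h⟩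
    · rintro (h | ⟨q, (rfl | hq), h1, h2⟩)
      · exact Or.inl (Or.inl h)
      · exact Or.inl (Or.inr ⟨h2, h1.symm⟩)
      · exact Or.inr ⟨q, hq, h1, h2⟩

theorem mem_index (t th : String) :
    th ∈ KEYWORD_TO_THEMES.getD t [] ↔ ∃ p ∈ THEME_KEYWORDS.items, p.1 = th ∧ t ∈ p.2 := by
  unfold KEYWORD_TO_THEMES
  rw [mem_getD_outer]
  simp [PySem.Dict.getD, PySem.Dict.get?, PySem.Dict.empty]

-- B's found loop: membership
theorem mem_foundB (terms : List String) (acc : PySem.Set String) (th : String) :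
    th ∈ terms.foldl (fun found t => PySem.Set.update found (KEYWORD_TO_THEMES.getD t [])) acc
      ↔ th ∈ acc ∨ ∃ t ∈ terms, th ∈ KEYWORD_TO_THEMES.getD t [] := by
  induction terms generalizing acc with
  | nil => simp
  | cons t rest ih =>
    simp only [List.foldl_cons, ih, PySem.Set.mem_update, List.mem_cons]
    constructor
    · rintro ((h | h) | ⟨t', ht', h⟩)
      · exact Or.inl h
      · exact Or.inr ⟨t, Or.inl rfl, h⟩
      · exact Or.inr ⟨t', Or.inr ht', h⟩
    · rintro (h | ⟨t', (rfl | ht'), h⟩)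
      · exact Or.inl (Or.inl h)
      · exact Or.inl (Or.inr h)
      · exact Or.inr ⟨t', ht', h⟩

-- B's found loop: no duplicates
theorem nodup_foundB (terms : List String) (acc : PySem.Set String) (h : acc.Nodup) :
    (terms.foldl (fun found t => PySem.Set.update found (KEYWORD_TO_THEMES.getD t [])) acc).Nodup := by
  induction terms generalizing acc with
  | nil => exact h
  | cons t rest ih => exact ih _ (PySem.Set.nodup_update _ _ h)

-- the body of both functions after the (identical) terms loop, for any terms list
theorem final_core (terms : List String) :
    (if (THEME_KEYWORDS.items.foldl (fun found p =>
          if terms.any (fun t => p.2.contains t) then found ++ [p.1] else found) []) ≠ [] then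
       PySem.Str.join ", " (PySem.List.sorted (PySem.Set.ofList
         (THEME_KEYWORDS.items.foldl (fun found p =>
           if terms.any (fun t => p.2.contains t) then found ++ [p.1] else found) []))
         (fun x => x) false)
     else "General / Unspecified")
    = (if (terms.foldl (fun found t =>
            PySem.Set.update found (KEYWORD_TO_THEMES.getD t [])) PySem.Set.empty) ≠ [] then
         PySem.Str.join ", " (PySem.List.sorted
           (terms.foldl (fun found t =>
             PySem.Set.update found (KEYWORD_TO_THEMES.getD t [])) PySem.Set.empty)
           (fun x => x) false)
       else "General / Unspecified") := by
  set foundA : List String := THEME_KEYWORDS.items.foldl (fun found p =>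
    if terms.any (fun t => p.2.contains t) then found ++ [p.1] else found) [] with hA
  set foundB : PySem.Set String := terms.foldl (fun found t =>
    PySem.Set.update found (KEYWORD_TO_THEMES.getD t [])) PySem.Set.empty with hB
  have hmem : ∀ th, th ∈ foundA ↔ th ∈ foundB := by
    intro th
    rw [hA, PySem.List.foldl_append_if, hB, mem_foundB]
    simp only [List.nil_append, List.mem_map, List.mem_filter, List.any_eq_true,
      List.contains_iff_mem, PySem.Set.empty, List.not_mem_nil, false_or]
    constructor
    · rintro ⟨p, ⟨hp, t, ht, htp⟩, rfl⟩
      exact ⟨t, ht, (mem_index t p.1).mpr ⟨p, hp, rfl, htp⟩⟩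
    · rintro ⟨t, ht, hth⟩
      obtain ⟨p, hp, h1, h2⟩ := (mem_index t th).mp hth
      exact ⟨p, ⟨hp, t, ht, h2⟩, h1⟩
  have hempty : foundA = [] ↔ foundB = [] := by
    simp only [List.eq_nil_iff_forall_not_mem]
    exact ⟨fun h x hx => h x ((hmem x).mpr hx), fun h x hx => h x ((hmem x).mp hx)⟩
  by_cases hAe : foundA = []
  · rw [if_neg (by simp [hAe]), if_neg (by simp [hempty.mp hAe])]
  · have hBe : foundB ≠ [] := fun h => hAe (hempty.mpr h)
    rw [if_pos hAe, if_pos hBe]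
    congr 1
    rw [PySem.List.sorted_id_eq_sorted_id_iff_perm]
    rw [List.perm_ext_iff_of_nodup (PySem.Set.nodup_ofList foundA)
      (nodup_foundB terms PySem.Set.empty List.nodup_nil)]
    intro a
    rw [PySem.Set.mem_ofList]
    exact hmem a

-- ===== VERDICT (by name: the statement is the Claim_ definition above) =====
theorem assign_theme_spec : Claim_equal_assign_theme := by
  intro keywords _
  unfold Spec_assign_theme assign_theme assign_theme_alt
  exact final_core _
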